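-- pv_equiv track=rewrite | github.com/amarh/openPLM | trunk/openPLM/plmapp/forms.py | group_types
-- ===== SOURCE A (Python) =====
-- def group_types(types):
--     res = []
--     group = []
--     for type_, long_name in types:
--         if long_name[0] not in '=>':
--             group = []
--             res.append((long_name, group))
--         group.append((type_, long_name))
--     return res
-- ===== SOURCE B (Python) =====
-- def group_types(types):
--     # annotate each item with a continuation flag (ln[0] touched for every item, as in A)
--     items = [(t, ln, ln[0] in '=>') for t, ln in types]
--
--     def build(seq):
--         # seq is empty or starts with a header item; split off one group, recurse
--         if not seq:
--             return []
--         k = 1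
--         while k < len(seq) and seq[k][2]:
--             k += 1
--         return [(seq[0][1], [(t, ln) for t, ln, _ in seq[:k]])] + build(seq[k:])
--
--     j = 0
--     while j < len(items) and items[j][2]:
--         j += 1
--     return build(items[j:])
-- ===== Notes on version B (the rewrite author's own statement) =====
-- stated objective: alternative
-- what changed: A threads one mutable open group through a single stateful pass; B precomputes a continuation flag per item, drops the unheaded prefix, and recursively splits the list into header-led segments (span/dropWhile decomposition).
import Mathlib
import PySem

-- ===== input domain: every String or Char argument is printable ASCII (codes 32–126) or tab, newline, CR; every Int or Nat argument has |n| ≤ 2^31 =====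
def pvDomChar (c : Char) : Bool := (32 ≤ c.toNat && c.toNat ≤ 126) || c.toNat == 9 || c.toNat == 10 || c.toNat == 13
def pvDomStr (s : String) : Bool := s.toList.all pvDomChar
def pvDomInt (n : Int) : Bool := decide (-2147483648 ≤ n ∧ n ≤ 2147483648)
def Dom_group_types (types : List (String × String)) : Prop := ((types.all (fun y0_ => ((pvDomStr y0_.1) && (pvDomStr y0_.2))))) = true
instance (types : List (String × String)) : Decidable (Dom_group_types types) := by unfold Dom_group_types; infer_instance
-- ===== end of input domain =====

-- B differs from A by decomposition only: A keeps one mutable open group during a single pass,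
-- B flags items, drops the unheaded prefix and splits recursively into header-led segments.

-- ===== PORT A =====
-- long_name[0] not in '=>'  (none = IndexError on empty long_name; Pre_ excludes that)
def pvHeadA (ln : String) : Bool :=
  match PySem.Str.pyGet? ln 0 with
  | some c => !(c == '=' || c == '>')
  | none => false

def pvCloseA (res : List (String × (List (String × String))))
    (cur : Option (String × (List (String × String)))) :
    List (String × (List (String × String))) :=
  match cur with
  | none => res
  | some hg => res ++ [hg]

-- res holds a reference to the currently open group; we model that by closing it at the end.
def group_types (types : List (String × String)) : List (String × (List (String × String))) :=
  let st := types.foldl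
    (fun st p =>
      if pvHeadA p.2 then (pvCloseA st.1 st.2, some (p.2, [(p.1, p.2)]))
      else (st.1, st.2.map (fun hg => (hg.1, hg.2 ++ [(p.1, p.2)]))))
    (([], none) : List (String × (List (String × String))) × Option (String × (List (String × String))))
  pvCloseA st.1 st.2

-- ===== PORT B =====
-- ln[0] in '=>'  (continuation flag; value on empty long_name irrelevant under Pre_)
def pvContB (ln : String) : Bool :=
  match PySem.Str.pyGet? ln 0 with
  | some c => c == '=' || c == '>'
  | none => true

def pvBuildB : List (String × String × Bool) → List (String × (List (String × String)))
  | [] => []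
  | x :: rest =>
    (x.2.1, (x :: rest.takeWhile (fun y => y.2.2)).map (fun y => (y.1, y.2.1)))
      :: pvBuildB (rest.dropWhile (fun y => y.2.2))
termination_by l => l.length
decreasing_by
  exact Nat.lt_succ_of_le (List.length_dropWhile_le _ _)

def group_types_alt (types : List (String × String)) : List (String × (List (String × String))) :=
  let items := types.map (fun p => (p.1, p.2, pvContB p.2))
  pvBuildB (items.dropWhile (fun y => y.2.2))

-- ===== PRECONDITION & SPEC =====
-- Pre_ excludes inputs containing an empty long_name, on which A (and B) raise IndexError at ln[0].
def Pre_group_types (types : List (String × String)) : Prop :=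
  ∀ p ∈ types, p.2 ≠ ""
instance (types : List (String × String)) : Decidable (Pre_group_types types) := by
  unfold Pre_group_types; infer_instance

def pvWitness_group_types : (List (String × String)) :=
  [("a", "Head"), ("b", "=cont"), ("c", ">more")]

def Spec_group_types (types : List (String × String)) (out : List (String × (List (String × String)))) : Prop := out = group_types_alt types
instance (types : List (String × String)) (out : List (String × (List (String × String)))) : Decidable (Spec_group_types types out) := by unfold Spec_group_types; infer_instance

-- ===== CLAIM (what is proved, stated in full; the proofs are below) =====
def Claim_equal_group_types : Prop := ∀ (types : List (String × String)), Dom_group_types types → Pre_group_types types → Spec_group_types types (group_types types)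

-- ===== LEMMAS AND PROOFS =====

theorem pv_toList_ne_nil (s : String) (h : s ≠ "") : s.toList ≠ [] := by
  intro hn
  apply h
  have := congrArg String.ofList hn
  simpa using this

theorem pvHeadA_eq_not_cont (ln : String) (h : ln ≠ "") : pvHeadA ln = !pvContB ln := by
  have hne : ln.toList ≠ [] := pv_toList_ne_nil ln h
  have hsome : PySem.List.pyGet? ln.toList 0 ≠ none := by
    simp [PySem.List.pyGet?_eq_none_iff, PySem.Raise.InRange]
    have := List.length_pos_iff.mpr hne
    omega
  cases hg : PySem.List.pyGet? ln.toList 0 with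
  | none => exact absurd hg hsome
  | some c => simp [pvHeadA, pvContB, PySem.Str.pyGet?, hg, Bool.not_or]

def pvStepA := fun (st : List (String × (List (String × String))) × Option (String × (List (String × String)))) (p : String × String) =>
      if pvHeadA p.2 then (pvCloseA st.1 st.2, some (p.2, [(p.1, p.2)]))
      else (st.1, st.2.map (fun hg => (hg.1, hg.2 ++ [(p.1, p.2)])))

def pvM (l : List (String × String)) : List (String × String × Bool) :=
  l.map (fun p => (p.1, p.2, pvContB p.2))

def pvStrip (l : List (String × String × Bool)) : List (String × String) :=
  l.map (fun y => (y.1, y.2.1))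

theorem pvBuildB_nil : pvBuildB [] = [] := by rw [pvBuildB]

theorem pvBuildB_cons (x : String × String × Bool) (rest : List (String × String × Bool)) :
    pvBuildB (x :: rest)
      = (x.2.1, (x :: rest.takeWhile (fun y => y.2.2)).map (fun y => (y.1, y.2.1)))
          :: pvBuildB (rest.dropWhile (fun y => y.2.2)) := by rw [pvBuildB]

-- open-group invariant: folding A's step with an open group (h, g) appends the pending
-- continuation items to g, closes it, and the remainder is grouped as B groups it
theorem pv_open (l : List (String × String)) :
    ∀ res h g, Pre_group_types l →
    pvCloseA (l.foldl pvStepA (res, some (h, g))).1 (l.foldl pvStepA (res, some (h, g))).2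
      = res ++ (h, g ++ pvStrip ((pvM l).takeWhile (fun y => y.2.2)))
          :: pvBuildB ((pvM l).dropWhile (fun y => y.2.2)) := by
  induction l with
  | nil => intro res h g _; simp [pvCloseA, pvM, pvStrip, pvBuildB_nil]
  | cons x t ih =>
    intro res h g hpre
    have hx : x.2 ≠ "" := hpre x (by simp)
    have ht : Pre_group_types t := fun p hp => hpre p (List.mem_cons_of_mem _ hp)
    have hflip := pvHeadA_eq_not_cont x.2 hx
    by_cases hc : pvContB x.2 = true
    · -- continuation: appended to the open group
      have hh : pvHeadA x.2 = false := by rw [hflip, hc]; rfl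
      have hstep : pvStepA (res, some (h, g)) x = (res, some (h, g ++ [(x.1, x.2)])) := by
        simp [pvStepA, hh]
      rw [List.foldl_cons, hstep, ih res h (g ++ [(x.1, x.2)]) ht]
      simp [pvM, hc, pvStrip]
    · -- header: closes the open group, starts a new one
      have hh : pvHeadA x.2 = true := by rw [hflip]; simp at hc; simp [hc]
      have hstep : pvStepA (res, some (h, g)) x
          = (res ++ [(h, g)], some (x.2, [(x.1, x.2)])) := by
        simp [pvStepA, hh, pvCloseA]
      rw [List.foldl_cons, hstep, ih (res ++ [(h, g)]) x.2 [(x.1, x.2)] ht]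
      simp only [pvM, List.map_cons]
      rw [List.takeWhile_cons_of_neg (by simpa using hc),
          List.dropWhile_cons_of_neg (by simpa using hc), pvBuildB_cons]
      simp [pvStrip]

-- no open group yet: leading continuation items are discarded
theorem pv_closed (l : List (String × String)) :
    ∀ res, Pre_group_types l →
    pvCloseA (l.foldl pvStepA (res, none)).1 (l.foldl pvStepA (res, none)).2
      = res ++ pvBuildB ((pvM l).dropWhile (fun y => y.2.2)) := by
  induction l with
  | nil => intro res _; simp [pvCloseA, pvM, pvBuildB_nil]
  | cons x t ih =>
    intro res hpre
    have hx : x.2 ≠ "" := hpre x (by simp)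
    have ht : Pre_group_types t := fun p hp => hpre p (List.mem_cons_of_mem _ hp)
    have hflip := pvHeadA_eq_not_cont x.2 hx
    by_cases hc : pvContB x.2 = true
    · have hh : pvHeadA x.2 = false := by rw [hflip, hc]; rfl
      have hstep : pvStepA (res, none) x = (res, none) := by simp [pvStepA, hh]
      rw [List.foldl_cons, hstep, ih res ht]
      simp [pvM, hc]
    · have hh : pvHeadA x.2 = true := by rw [hflip]; simp at hc; simp [hc]
      have hstep : pvStepA (res, none) x = (res, some (x.2, [(x.1, x.2)])) := by
        simp [pvStepA, hh, pvCloseA]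
      rw [List.foldl_cons, hstep, pv_open t res x.2 [(x.1, x.2)] ht]
      simp only [pvM, List.map_cons]
      rw [List.dropWhile_cons_of_neg (by simpa using hc), pvBuildB_cons]
      simp [pvStrip]

-- ===== VERDICT (by name: the statement is the Claim_ definition above) =====
theorem group_types_spec : Claim_equal_group_types := by
  intro types _ hpre
  unfold Spec_group_types group_types group_types_alt
  have := pv_closed types [] hpre
  simpa [pvStepA, pvM] using this
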